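-- pv_equiv track=rewrite | github.com/Muzsy/VRS_nesting | worker/engine_adapter_input.py | _rotation_policy_to_allowed_degrees
-- ===== SOURCE A (Python) =====
-- from typing import Any
--
-- class EngineAdapterInputError(RuntimeError):
--     pass
--
-- def _parse_nonnegative_int(raw: Any, *, field: str) -> int:
--     if isinstance(raw, bool):
--         raise EngineAdapterInputError(f"invalid {field}")
--     try:
--         value = int(raw)
--     except (TypeError, ValueError) as exc:
--         raise EngineAdapterInputError(f"invalid {field}") from exc
--     if value < 0:
--         raise EngineAdapterInputError(f"invalid {field}")
--     return value
--
-- def _parse_positive_int(raw: Any, *, field: str) -> int: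
--     value = _parse_nonnegative_int(raw, field=field)
--     if value <= 0:
--         raise EngineAdapterInputError(f"invalid {field}")
--     return value
--
-- def _rotation_policy_to_allowed_degrees(solver_config: dict[str, Any]) -> list[int]:
--     allow_free = bool(solver_config.get("allow_free_rotation"))
--     if allow_free:
--         raise EngineAdapterInputError("unsupported rotation policy: allow_free_rotation=true is not mappable to solver v1")
--
--     step = _parse_positive_int(solver_config.get("rotation_step_deg"), field="solver_config_jsonb.rotation_step_deg")
--     seen: set[int] = set()
--     ordered: list[int] = []
--     angle = 0
--     for _ in range(360):
--         if angle in seen: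
--             break
--         seen.add(angle)
--         ordered.append(angle)
--         angle = (angle + step) % 360
--
--     if not ordered:
--         raise EngineAdapterInputError("unsupported rotation policy: empty rotation set")
--
--     allowed = {0, 90, 180, 270}
--     unsupported = sorted({value for value in ordered if value not in allowed})
--     if unsupported:
--         raise EngineAdapterInputError(
--             f"unsupported rotation policy: rotation_step_deg={step} yields {unsupported}, solver v1 allows 0/90/180/270"
--         )
--     return sorted(set(ordered))
-- ===== SOURCE B (Python) =====
-- from typing import Any
--
-- class EngineAdapterInputError(RuntimeError):
--     pass
--
-- def _parse_nonnegative_int(raw: Any, *, field: str) -> int: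
--     if isinstance(raw, bool):
--         raise EngineAdapterInputError(f"invalid {field}")
--     try:
--         value = int(raw)
--     except (TypeError, ValueError) as exc:
--         raise EngineAdapterInputError(f"invalid {field}") from exc
--     if value < 0:
--         raise EngineAdapterInputError(f"invalid {field}")
--     return value
--
-- def _parse_positive_int(raw: Any, *, field: str) -> int:
--     value = _parse_nonnegative_int(raw, field=field)
--     if value <= 0:
--         raise EngineAdapterInputError(f"invalid {field}")
--     return value
--
-- def _rotation_policy_to_allowed_degrees(solver_config: dict[str, Any]) -> list[int]:
--     if bool(solver_config.get("allow_free_rotation")):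
--         raise EngineAdapterInputError("unsupported rotation policy: allow_free_rotation=true is not mappable to solver v1")
--
--     step = _parse_positive_int(solver_config.get("rotation_step_deg"), field="solver_config_jsonb.rotation_step_deg")
--
--     # closed form: the reachable angles are the multiples of g = gcd(step, 360)
--     a, b = step % 360, 360
--     while a:
--         a, b = b % a, a
--     g = b
--     angles = list(range(0, 360, g))
--
--     unsupported = sorted(v for v in angles if v not in {0, 90, 180, 270})
--     if unsupported:
--         raise EngineAdapterInputError(
--             f"unsupported rotation policy: rotation_step_deg={step} yields {unsupported}, solver v1 allows 0/90/180/270"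
--         )
--     return angles
-- ===== Notes on version B (the rewrite author's own statement) =====
-- stated objective: alternative
-- what changed: Replaces the 360-iteration orbit loop (seen-set + ordered list with early break) by the closed form g = gcd(step, 360) via a small Euclid loop, the reachable angles being exactly range(0, 360, g), which is already sorted and duplicate-free.
import Mathlib
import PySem

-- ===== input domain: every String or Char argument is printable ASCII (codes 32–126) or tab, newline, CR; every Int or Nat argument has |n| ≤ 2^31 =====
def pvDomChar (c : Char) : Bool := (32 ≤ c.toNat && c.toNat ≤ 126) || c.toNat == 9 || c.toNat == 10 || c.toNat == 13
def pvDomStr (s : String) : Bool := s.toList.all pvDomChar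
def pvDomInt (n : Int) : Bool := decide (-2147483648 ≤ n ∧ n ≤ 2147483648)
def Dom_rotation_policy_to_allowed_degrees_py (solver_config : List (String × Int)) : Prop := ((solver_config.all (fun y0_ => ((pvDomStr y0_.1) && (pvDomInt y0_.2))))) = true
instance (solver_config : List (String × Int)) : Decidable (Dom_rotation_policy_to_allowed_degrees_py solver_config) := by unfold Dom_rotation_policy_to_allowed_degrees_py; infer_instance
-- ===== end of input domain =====

-- B replaces A's 360-iteration orbit loop by Euclid's gcd and a single range(0, 360, g);
-- equivalence is about the RETURN value (both raise EngineAdapterInputError outside Pre_, modelled as []).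

-- ===== PORT A =====
-- the `for _ in range(360)` loop with early break; fuel = the 360 iterations
def rotA_loop : Nat → Int → PySem.Set Int → List Int → Int → List Int
  | 0, _, _, ordered, _ => ordered
  | n+1, step, seen, ordered, angle =>
    if PySem.Set.contains seen angle then ordered
    else rotA_loop n step (PySem.Set.add seen angle) (ordered ++ [angle])
           (PySem.Int.mod (angle + step) 360)

-- everything after the step has been parsed (step > 0 guaranteed by the caller)
def rotA_after (step : Int) : List Int :=
  let ordered := rotA_loop 360 step PySem.Set.empty [] 0
  if ordered = [] then []  -- raise "empty rotation set"
  else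
    let unsupported := PySem.List.sorted
      (PySem.Set.ofList (ordered.filter (fun v => decide (v ∉ ([0, 90, 180, 270] : List Int)))))
      (fun x => x) false
    if unsupported ≠ [] then []  -- raise "unsupported rotation policy"
    else PySem.List.sorted (PySem.Set.ofList ordered) (fun x => x) false

def rotation_policy_to_allowed_degrees_py (solver_config : List (String × Int)) : List Int :=
  let allow_free : Bool :=
    match (PySem.Dict.mk solver_config).get? "allow_free_rotation" with
    | some v => v != 0
    | none => false
  if allow_free then []  -- raise
  else
    match (PySem.Dict.mk solver_config).get? "rotation_step_deg" with
    | none => []  -- int(None) raises TypeError → EngineAdapterInputError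
    | some step => if step ≤ 0 then [] else rotA_after step

-- ===== PORT B =====
-- Euclid's gcd as in Source B's while loop; a = step % 360 ≥ 0 throughout, so `while a:` is `0 < a`
def rotB_gcd (a b : Int) : Int :=
  if h : 0 < a then rotB_gcd (PySem.Int.mod b a) a else b
termination_by a.toNat
decreasing_by
  have hm : PySem.Int.mod b a = b % a := PySem.Int.mod_eq_emod_of_pos h
  have h2 : b % a < a := Int.emod_lt_of_pos b h
  have h3 : (0:Int) ≤ b % a := Int.emod_nonneg b (by omega)
  simp [hm]; omega

-- everything after the step has been parsed; r = step % 360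
def rotB_after (r : Int) : List Int :=
  let g := rotB_gcd r 360
  let angles := PySem.List.pyRange 0 360 g
  let unsupported := PySem.List.sorted
    (angles.filter (fun v => decide (v ∉ ([0, 90, 180, 270] : List Int))))
    (fun x => x) false
  if unsupported ≠ [] then []  -- raise
  else angles

def rotation_policy_to_allowed_degrees_py_alt (solver_config : List (String × Int)) : List Int :=
  let allow_free : Bool :=
    match (PySem.Dict.mk solver_config).get? "allow_free_rotation" with
    | some v => v != 0
    | none => false
  if allow_free then []
  else
    match (PySem.Dict.mk solver_config).get? "rotation_step_deg" with
    | none => []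
    | some step => if step ≤ 0 then [] else rotB_after (PySem.Int.mod step 360)

-- ===== PRECONDITION & SPEC =====
-- Pre_ = exactly the inputs on which A returns: allow_free_rotation absent or 0, a positive
-- rotation_step_deg present, and its orbit inside {0,90,180,270}, i.e. step % 360 ∈ {0,90,180,270}.
def Pre_rotation_policy_to_allowed_degrees_py (solver_config : List (String × Int)) : Prop :=
  (PySem.Dict.getD (PySem.Dict.mk solver_config) "allow_free_rotation" 0 = 0) ∧
  ((PySem.Dict.mk solver_config).get? "rotation_step_deg").isSome = true ∧
  0 < PySem.Dict.getD (PySem.Dict.mk solver_config) "rotation_step_deg" 0 ∧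
  PySem.Int.mod (PySem.Dict.getD (PySem.Dict.mk solver_config) "rotation_step_deg" 0) 360
    ∈ ([0, 90, 180, 270] : List Int)
instance (solver_config : List (String × Int)) : Decidable (Pre_rotation_policy_to_allowed_degrees_py solver_config) := by unfold Pre_rotation_policy_to_allowed_degrees_py; infer_instance

def pvWitness_rotation_policy_to_allowed_degrees_py : (List (String × Int)) := [("rotation_step_deg", 90)]

def Spec_rotation_policy_to_allowed_degrees_py (solver_config : List (String × Int)) (out : List Int) : Prop := out = rotation_policy_to_allowed_degrees_py_alt solver_config
instance (solver_config : List (String × Int)) (out : List Int) : Decidable (Spec_rotation_policy_to_allowed_degrees_py solver_config out) := by unfold Spec_rotation_policy_to_allowed_degrees_py; infer_instance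

-- ===== CLAIM (what is proved, stated in full; the proofs are below) =====
def Claim_equal_rotation_policy_to_allowed_degrees_py : Prop := ∀ (solver_config : List (String × Int)), Dom_rotation_policy_to_allowed_degrees_py solver_config → Pre_rotation_policy_to_allowed_degrees_py solver_config → Spec_rotation_policy_to_allowed_degrees_py solver_config (rotation_policy_to_allowed_degrees_py solver_config)

-- ===== LEMMAS AND PROOFS =====

-- A's loop only sees step through (angle + step) % 360, so step may be replaced by step % 360
theorem rotA_loop_mod (n : Nat) (step : Int) : ∀ (seen : PySem.Set Int) (ordered : List Int) (angle : Int),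
    rotA_loop n step seen ordered angle = rotA_loop n (PySem.Int.mod step 360) seen ordered angle := by
  induction n with
  | zero => intro seen ordered angle; rfl
  | succ n ih =>
    intro seen ordered angle
    simp only [rotA_loop]
    split
    · rfl
    · have hmod : ∀ x : Int, PySem.Int.mod x 360 = x % 360 :=
        fun x => PySem.Int.mod_eq_emod_of_pos (by norm_num)
      have : PySem.Int.mod (angle + step) 360 = PySem.Int.mod (angle + PySem.Int.mod step 360) 360 := by
        simp only [hmod]; omega
      rw [this, ih]

-- after parsing, the two tails agree for every admitted step
theorem rot_after_eq (s : Int)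
    (hr : PySem.Int.mod s 360 ∈ ([0, 90, 180, 270] : List Int)) :
    rotA_after s = rotB_after (PySem.Int.mod s 360) := by
  unfold rotA_after
  rw [rotA_loop_mod]
  have hr' : PySem.Int.mod s 360 = 0 ∨ PySem.Int.mod s 360 = 90 ∨
      PySem.Int.mod s 360 = 180 ∨ PySem.Int.mod s 360 = 270 := by simpa using hr
  rcases hr' with hr' | hr' | hr' | hr'
  · rw [hr']
    have hg : rotB_gcd 0 360 = 360 := by simp [rotB_gcd.eq_def]
    simp only [rotB_after, hg]; decide
  · rw [hr']
    have hg : rotB_gcd 90 360 = 90 := by simp [rotB_gcd.eq_def, PySem.Int.mod]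
    simp only [rotB_after, hg]; decide
  · rw [hr']
    have hg : rotB_gcd 180 360 = 180 := by simp [rotB_gcd.eq_def, PySem.Int.mod]
    simp only [rotB_after, hg]; decide
  · rw [hr']
    have hg : rotB_gcd 270 360 = 90 := by simp [rotB_gcd.eq_def, PySem.Int.mod]
    simp only [rotB_after, hg]; decide

-- ===== VERDICT (by name: the statement is the Claim_ definition above) =====
theorem rotation_policy_to_allowed_degrees_py_spec : Claim_equal_rotation_policy_to_allowed_degrees_py := by
  intro sc _ hPre
  obtain ⟨hAF, hSome, hPos, hMem⟩ := hPre
  unfold Spec_rotation_policy_to_allowed_degrees_py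
  unfold rotation_policy_to_allowed_degrees_py rotation_policy_to_allowed_degrees_py_alt
  cases hA : (PySem.Dict.mk sc).get? "allow_free_rotation" with
  | none =>
    cases hS : (PySem.Dict.mk sc).get? "rotation_step_deg" with
    | none => rw [hS] at hSome
    | some s =>
      have hgetD : PySem.Dict.getD (PySem.Dict.mk sc) "rotation_step_deg" 0 = s := by
        rw [PySem.Dict.getD_eq_get?_getD, hS]; rfl
      rw [hgetD] at hPos hMem
      have hns : ¬ s ≤ 0 := by omega
      simp only [if_neg hns]
      exact rot_after_eq s hMem
  | some v =>
    have : v = 0 := by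
      rw [PySem.Dict.getD_eq_get?_getD, hA] at hAF; exact hAF
    subst this
    cases hS : (PySem.Dict.mk sc).get? "rotation_step_deg" with
    | none => rw [hS] at hSome
    | some s =>
      have hgetD : PySem.Dict.getD (PySem.Dict.mk sc) "rotation_step_deg" 0 = s := by
        rw [PySem.Dict.getD_eq_get?_getD, hS]; rfl
      rw [hgetD] at hPos hMem
      have hns : ¬ s ≤ 0 := by omega
      simp only [if_neg hns]
      exact rot_after_eq s hMem
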